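-- pv_equiv track=rewrite | github.com/AL2H28/Cryptography | src/aes.py | affine_transform
-- ===== SOURCE A (Python) =====
-- def affine_transform(x):
--     """AES S-box affinn transzformációja (bitenkénti XOR + 0x63 hozzáadása)."""
--     # az eredeti AES definíció alapján:
--     # b_i' = b_i ⊕ b_{i+4} ⊕ b_{i+5} ⊕ b_{i+6} ⊕ b_{i+7} ⊕ c_i
--     # ahol c = 0x63
--     c = 0x63
--     res = 0
--     for i in range(8):
--         bit = ((x >> i) & 1) ^ \
--               ((x >> ((i + 4) % 8)) & 1) ^ \
--               ((x >> ((i + 5) % 8)) & 1) ^ \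
--               ((x >> ((i + 6) % 8)) & 1) ^ \
--               ((x >> ((i + 7) % 8)) & 1) ^ \
--               ((c >> i) & 1)
--         res |= (bit << i)
--     # egyszerűsített formában:
--     #res = x ^ (x << 1) ^ (x << 2) ^ (x << 3) ^ (x << 4) ^ 0x63
--     return res
-- ===== SOURCE B (Python) =====
-- def affine_transform(x):
--     """AES S-box affine transformation as one closed-form XOR of byte rotations."""
--     v = x & 0xFF
--
--     def rotl(n):
--         return ((v << n) | (v >> (8 - n))) & 0xFF
--
--     return v ^ rotl(1) ^ rotl(2) ^ rotl(3) ^ rotl(4) ^ 0x63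
-- ===== Notes on version B (the rewrite author's own statement) =====
-- stated objective: simpler
-- what changed: Replaces the eight-iteration per-bit accumulation loop (each output bit XORed together from five shifted single-bit reads) by a single closed-form expression: mask the input to a byte and XOR that byte with its first four left-rotations and with the constant 0x63.
import Mathlib
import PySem

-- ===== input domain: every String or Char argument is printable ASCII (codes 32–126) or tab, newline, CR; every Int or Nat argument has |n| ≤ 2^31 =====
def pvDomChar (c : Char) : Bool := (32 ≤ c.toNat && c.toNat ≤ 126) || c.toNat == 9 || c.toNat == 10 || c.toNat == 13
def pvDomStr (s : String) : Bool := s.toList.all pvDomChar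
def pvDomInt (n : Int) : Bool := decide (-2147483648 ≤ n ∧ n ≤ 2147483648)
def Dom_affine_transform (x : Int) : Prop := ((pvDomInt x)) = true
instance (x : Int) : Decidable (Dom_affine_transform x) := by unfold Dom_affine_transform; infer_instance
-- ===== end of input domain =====

-- B replaces A's per-bit accumulation loop by the closed-form byte expression: mask x to a byte v and return v XOR its first four left-rotations XOR 0x63 (simpler: no loop over bit positions).


-- ===== PORT A =====
def affine_transform (x : Int) : Int :=
  let c : Int := 0x63
  (PySem.List.pyRange 0 8 1).foldl
    (fun res i =>
      let bit :=
        PySem.Int.bxor (PySem.Int.bxor (PySem.Int.bxor (PySem.Int.bxor (PySem.Int.bxor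
          (PySem.Int.band (x >>> i.toNat) 1)
          (PySem.Int.band (x >>> (PySem.Int.mod (i + 4) 8).toNat) 1))
          (PySem.Int.band (x >>> (PySem.Int.mod (i + 5) 8).toNat) 1))
          (PySem.Int.band (x >>> (PySem.Int.mod (i + 6) 8).toNat) 1))
          (PySem.Int.band (x >>> (PySem.Int.mod (i + 7) 8).toNat) 1))
          (PySem.Int.band (c >>> i.toNat) 1)
      PySem.Int.bor res (bit <<< i.toNat))
    0

-- ===== PORT B =====
def affine_transform_alt (x : Int) : Int :=
  let v := PySem.Int.band x 0xFF
  let rotl := fun (n : Nat) => PySem.Int.band (PySem.Int.bor (v <<< n) (v >>> (8 - n))) 0xFF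
  PySem.Int.bxor (PySem.Int.bxor (PySem.Int.bxor (PySem.Int.bxor (PySem.Int.bxor
    v (rotl 1)) (rotl 2)) (rotl 3)) (rotl 4)) 0x63

-- ===== PRECONDITION & SPEC =====
def Spec_affine_transform (x : Int) (out : Int) : Prop := out = affine_transform_alt x
instance (x : Int) (out : Int) : Decidable (Spec_affine_transform x out) := by unfold Spec_affine_transform; infer_instance

-- ===== CLAIM (what is proved, stated in full; the proofs are below) =====
def Claim_equal_affine_transform : Prop := ∀ (x : Int), Dom_affine_transform x → Spec_affine_transform x (affine_transform x)

-- ===== LEMMAS AND PROOFS =====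

-- Python's x & 255 is x mod 256, also for negative x (infinite two's complement)
theorem band255_eq_emod (x : Int) : PySem.Int.band x 255 = x % 256 := by
  simp only [PySem.Int.band, show ((255:Int).toNat = 255) from rfl]
  split_ifs with h1 h2 h2
  · have := Nat.and_two_pow_sub_one_eq_mod x.toNat 8
    norm_num at this; omega
  · omega
  · have h := Nat.and_two_pow_sub_one_eq_mod (-x - 1).toNat 8
    rw [Nat.and_comm, show ((2:Nat)^8 - 1 = 255) from rfl, show ((2:Nat)^8 = 256) from rfl] at h
    omega
  · omega

-- bit j of x equals bit j of x % 256, for j < 8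
theorem bit_emod (x : Int) (j : Nat) (hj : j < 8) :
    PySem.Int.band (x >>> j) 1 = PySem.Int.band ((x % 256) >>> j) 1 := by
  rw [PySem.Int.band_one, PySem.Int.band_one,
      PySem.Int.mod_eq_emod_of_pos (by omega), PySem.Int.mod_eq_emod_of_pos (by omega),
      Int.shiftRight_eq_div_pow, Int.shiftRight_eq_div_pow]
  interval_cases j <;> norm_num <;> omega

-- A reads only the low 8 bits of x
theorem A_mod (x : Int) : affine_transform x = affine_transform (x % 256) := by
  simp only [affine_transform,
    show PySem.List.pyRange 0 8 1 = [0,1,2,3,4,5,6,7] from by decide,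
    List.foldl]
  simp only [show (((0:ℤ)).toNat = 0) from rfl, show ((PySem.Int.mod ((0:ℤ) + 4) 8).toNat = 4) from by decide, show ((PySem.Int.mod ((0:ℤ) + 5) 8).toNat = 5) from by decide, show ((PySem.Int.mod ((0:ℤ) + 6) 8).toNat = 6) from by decide, show ((PySem.Int.mod ((0:ℤ) + 7) 8).toNat = 7) from by decide, show (((1:ℤ)).toNat = 1) from rfl, show ((PySem.Int.mod ((1:ℤ) + 4) 8).toNat = 5) from by decide, show ((PySem.Int.mod ((1:ℤ) + 5) 8).toNat = 6) from by decide, show ((PySem.Int.mod ((1:ℤ) + 6) 8).toNat = 7) from by decide, show ((PySem.Int.mod ((1:ℤ) + 7) 8).toNat = 0) from by decide, show (((2:ℤ)).toNat = 2) from rfl, show ((PySem.Int.mod ((2:ℤ) + 4) 8).toNat = 6) from by decide, show ((PySem.Int.mod ((2:ℤ) + 5) 8).toNat = 7) from by decide, show ((PySem.Int.mod ((2:ℤ) + 6) 8).toNat = 0) from by decide, show ((PySem.Int.mod ((2:ℤ) + 7) 8).toNat = 1) from by decide, show (((3:ℤ)).toNat = 3) from rfl, show ((PySem.Int.mod ((3:ℤ)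 + 4) 8).toNat = 7) from by decide, show ((PySem.Int.mod ((3:ℤ) + 5) 8).toNat = 0) from by decide, show ((PySem.Int.mod ((3:ℤ) + 6) 8).toNat = 1) from by decide, show ((PySem.Int.mod ((3:ℤ) + 7) 8).toNat = 2) from by decide, show (((4:ℤ)).toNat = 4) from rfl, show ((PySem.Int.mod ((4:ℤ) + 4) 8).toNat = 0) from by decide, show ((PySem.Int.mod ((4:ℤ) + 5) 8).toNat = 1) from by decide, show ((PySem.Int.mod ((4:ℤ) + 6) 8).toNat = 2) from by decide, show ((PySem.Int.mod ((4:ℤ) + 7) 8).toNat = 3) from by decide, show (((5:ℤ)).toNat = 5) from rfl, show ((PySem.Int.mod ((5:ℤ) + 4) 8).toNat = 1) from by decide, show ((PySem.Int.mod ((5:ℤ) + 5) 8).toNat = 2) from by decide, show ((PySem.Int.mod ((5:ℤ) + 6) 8).toNat = 3) from by decide, show ((PySem.Int.mod ((5:ℤ) + 7) 8).toNat = 4) from by decide, show (((6:ℤ)).toNat = 6) from rfl, show ((PySem.Int.mod ((6:ℤ) + 4) 8).toNat = 2) from by decide, show ((PySem.Int.mod ((6:ℤ) + 5) 8).toNat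 = 3) from by decide, show ((PySem.Int.mod ((6:ℤ) + 6) 8).toNat = 4) from by decide, show ((PySem.Int.mod ((6:ℤ) + 7) 8).toNat = 5) from by decide, show (((7:ℤ)).toNat = 7) from rfl, show ((PySem.Int.mod ((7:ℤ) + 4) 8).toNat = 3) from by decide, show ((PySem.Int.mod ((7:ℤ) + 5) 8).toNat = 4) from by decide, show ((PySem.Int.mod ((7:ℤ) + 6) 8).toNat = 5) from by decide, show ((PySem.Int.mod ((7:ℤ) + 7) 8).toNat = 6) from by decide]
  simp only [Int.shiftRight_natCast_right]
  rw [bit_emod x 0 (by omega), bit_emod x 1 (by omega), bit_emod x 2 (by omega),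
      bit_emod x 3 (by omega), bit_emod x 4 (by omega), bit_emod x 5 (by omega),
      bit_emod x 6 (by omega), bit_emod x 7 (by omega)]

-- B reads only the low 8 bits of x (its very first step is the mask)
theorem B_mod (x : Int) : affine_transform_alt x = affine_transform_alt (x % 256) := by
  simp only [affine_transform_alt, band255_eq_emod,
    Int.emod_emod_of_dvd x (by norm_num : (256:Int) ∣ 256)]

-- exhaustive byte check
set_option maxRecDepth 8192 in
theorem byte_key : ∀ r : Fin 256, affine_transform (r : Int) = affine_transform_alt (r : Int) := by decide

-- ===== VERDICT (by name: the statement is the Claim_ definition above) =====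
theorem affine_transform_spec : Claim_equal_affine_transform := by
  intro x _
  unfold Spec_affine_transform
  rw [A_mod, B_mod]
  have h0 : 0 ≤ x % 256 := Int.emod_nonneg x (by norm_num)
  have h1 : x % 256 < 256 := Int.emod_lt_of_pos x (by norm_num)
  have hx : x % 256 = ((⟨(x % 256).toNat, by omega⟩ : Fin 256) : Int) := by simp; omega
  rw [hx]
  exact byte_key _
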